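-- pv_equiv track=rewrite | github.com/StopSoo/PS | 2025-PS/week-14/[SILVER V] 비밀번호발음하기.py | check_pw
-- ===== SOURCE A (Python) =====
-- def check_pw(pw):
--   for mo in 'aeiou':
--     if mo in pw: break
--   else: # 모음이 하나도 없다면 false 반환
--     return False
--
--   bef = pw[0]
--   for ind in range(1, len(pw)):
--     if (bef == 'e' and pw[ind] == 'e') or (bef == 'o' and pw[ind] == 'o') or (bef != pw[ind]):
--       bef = pw[ind] # 업데이트를 잘 해주기 (!)
--       continue
--     elif bef == pw[ind]: # ee와 oo 외 연속 두 번 같으면 false 반환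
--       return False
--
--   if len(pw) >= 3:
--     for i in range(len(pw)-2):
--       if all([ch in 'aeiou' for ch in pw[i:i+3]]): return False
--       elif all([ch not in 'aeiou' for ch in pw[i:i+3]]): return False
--   return True
-- ===== SOURCE B (Python) =====
-- def check_pw(pw):
--     has_vowel = False
--     prev = None        # previous character
--     prev_class = None  # class (vowel?) of previous character
--     run = 0            # length of current same-class run
--     for c in pw:
--         v = c in 'aeiou'
--         run = run + 1 if prev_class == v else 1
--         if run == 3:
--             return False
--         if c == prev and c not in 'eo':
--             return False
--         has_vowel = has_vowel or v
--         prev, prev_class = c, v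
--     return has_vowel
-- ===== Notes on version B (the rewrite author's own statement) =====
-- stated objective: alternative
-- what changed: Replaces A's three separate staged scans (for/else vowel search, a pair loop with a `bef` variable, an index loop over 3-char slices) by one single-pass finite-state automaton carrying (has_vowel, previous char, length of the current same-class run) and deciding all three rules in one traversal.
import Mathlib
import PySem

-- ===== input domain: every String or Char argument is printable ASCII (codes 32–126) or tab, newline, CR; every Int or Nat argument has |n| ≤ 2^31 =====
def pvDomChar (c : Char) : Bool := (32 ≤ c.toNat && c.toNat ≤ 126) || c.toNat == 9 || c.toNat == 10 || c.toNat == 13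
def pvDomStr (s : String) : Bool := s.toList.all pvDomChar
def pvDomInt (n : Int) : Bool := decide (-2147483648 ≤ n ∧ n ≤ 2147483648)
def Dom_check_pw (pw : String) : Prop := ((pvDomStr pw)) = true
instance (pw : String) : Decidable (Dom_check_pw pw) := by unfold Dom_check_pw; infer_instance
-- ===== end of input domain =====

-- B replaces A's three staged scans by one single-pass automaton carrying
-- (has_vowel, previous char, same-class run length); objective: alternative, same cost.

-- ===== PORT A =====
-- A's `for mo in 'aeiou': if mo in pw: break / else: return False`
def pvVowelLoopA : List Char → List Char → Bool
  | [], _ => false              -- for-else exhausted: return False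
  | v :: vs, s => if s.contains v then true else pvVowelLoopA vs s
-- A's `for ind in range(1, len(pw))` with state `bef`; pw[ind] is the head of the remaining suffix
def pvPairLoopA : Char → List Char → Bool
  | _, [] => true
  | bef, c :: rest =>
    if (bef = 'e' ∧ c = 'e') ∨ (bef = 'o' ∧ c = 'o') ∨ bef ≠ c then pvPairLoopA c rest
    else false                  -- elif bef == pw[ind]: return False
-- A's `for i in range(len(pw)-2)` with slices pw[i:i+3]: walk the suffixes of length ≥ 3
def pvTripleLoopA : List Char → Bool
  | a :: b :: c :: rest =>
    if ([a,b,c].all fun ch => "aeiou".toList.contains ch) then false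
    else if ([a,b,c].all fun ch => !("aeiou".toList.contains ch)) then false
    else pvTripleLoopA (b :: c :: rest)
  | _ => true

def check_pw (pw : String) : Bool :=
  let s := pw.toList
  if !pvVowelLoopA "aeiou".toList s then false
  else
    match s with
    | [] => false               -- unreachable: the empty string has no vowel
    | bef :: rest =>
      if !pvPairLoopA bef rest then false
      else if s.length ≥ 3 then pvTripleLoopA s
      else true

-- ===== PORT B =====
def pvIsV (c : Char) : Bool := c ∈ ['a','e','i','o','u']

-- B's single `for c in pw` loop: state = (has_vowel, prev, prev_class, run)
def pvLoopB (hasV : Bool) (prev : Option Char) (prevClass : Option Bool) (run : Nat) :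
    List Char → Bool
  | [] => hasV
  | c :: rest =>
    let v := pvIsV c
    let run' := if prevClass = some v then run + 1 else 1
    if run' = 3 then false
    else if prev = some c ∧ ¬ (c = 'e' ∨ c = 'o') then false
    else pvLoopB (hasV || v) (some c) (some v) run' rest

def check_pw_alt (pw : String) : Bool := pvLoopB false none none 0 pw.toList

-- ===== PRECONDITION & SPEC =====
def Spec_check_pw (pw : String) (out : Bool) : Prop := out = check_pw_alt pw
instance (pw : String) (out : Bool) : Decidable (Spec_check_pw pw out) := by unfold Spec_check_pw; infer_instance

-- ===== CLAIM (what is proved, stated in full; the proofs are below) =====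
def Claim_equal_check_pw : Prop := ∀ (pw : String), Dom_check_pw pw → Spec_check_pw pw (check_pw pw)

-- ===== LEMMAS AND PROOFS =====

theorem vowel_eq (s : List Char) : pvVowelLoopA "aeiou".toList s = s.any pvIsV := by
  show pvVowelLoopA ['a','e','i','o','u'] s = s.any pvIsV
  simp only [pvVowelLoopA]
  rw [Bool.eq_iff_iff]
  simp [List.any_eq_true, pvIsV]
  aesop

theorem isV_contains (c : Char) : "aeiou".toList.contains c = pvIsV c := by
  rw [Bool.eq_iff_iff]
  simp [pvIsV]
  try tauto

-- the head triple of a::b::l is all-same-class iff the boolean classes agree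
theorem triple_head (a b c : Char) (rest : List Char) :
    pvTripleLoopA (a :: b :: c :: rest)
      = if pvIsV a = pvIsV b ∧ pvIsV b = pvIsV c then false
        else pvTripleLoopA (b :: c :: rest) := by
  simp only [pvTripleLoopA, List.all_cons, List.all_nil, Bool.and_true, isV_contains]
  cases ha : pvIsV a <;> cases hb : pvIsV b <;> cases hc : pvIsV c <;> simp

-- invariant of B's automaton against A's pair and triple scans:
-- run = 1: the current same-class run has length 1 (prev starts it)
-- run = 2: additionally the next char must not extend the run
theorem loopB_spec (rest : List Char) : ∀ (p : Char) (hasV : Bool),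
    (pvLoopB hasV (some p) (some (pvIsV p)) 1 rest
      = (pvPairLoopA p rest && pvTripleLoopA (p :: rest) && (hasV || rest.any pvIsV)))
    ∧ (pvLoopB hasV (some p) (some (pvIsV p)) 2 rest
      = (pvPairLoopA p rest
          && ((match rest with | [] => true | c :: _ => !(pvIsV c = pvIsV p : Bool))
              && pvTripleLoopA (p :: rest))
          && (hasV || rest.any pvIsV))) := by
  induction rest with
  | nil =>
    intro p hasV
    constructor <;> simp [pvLoopB, pvPairLoopA, pvTripleLoopA]
  | cons c rest ih =>
    intro p hasV
    by_cases hpair : (p = 'e' ∧ c = 'e') ∨ (p = 'o' ∧ c = 'o') ∨ p ≠ c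
    · -- pair check passes
      have hbadpair : ¬ ((some p = some c) ∧ ¬ (c = 'e' ∨ c = 'o')) := by
        rcases hpair with ⟨rfl, rfl⟩ | ⟨rfl, rfl⟩ | hne
        · simp
        · simp
        · simp [hne]
      constructor
      · -- run = 1
        by_cases hcl : pvIsV p = pvIsV c
        · -- same class: run becomes 2
          simp only [pvLoopB, if_pos (by simp [hcl] : (some (pvIsV p) = some (pvIsV c))),
            if_neg (by omega : ¬ (1 + 1 = 3)), if_neg hbadpair]
          rw [(ih c (hasV || pvIsV c)).2]
          rw [show pvPairLoopA p (c :: rest) = pvPairLoopA c rest by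
            simp [pvPairLoopA, hpair]]
          cases rest with
          | nil => simp [pvTripleLoopA]
          | cons d rest' =>
            rw [triple_head]
            by_cases hd : pvIsV c = pvIsV d
            · have hhd : (!(pvIsV d = pvIsV c : Bool)) = false := by simp [hd.symm]
              have hcond : (pvIsV p = pvIsV c ∧ pvIsV c = pvIsV d) := ⟨hcl, hd⟩
              simp [hhd, if_pos hcond]
            · have : ¬ (pvIsV p = pvIsV c ∧ pvIsV c = pvIsV d) := by tauto
              simp only [if_neg this]
              have : (!(pvIsV d = pvIsV c : Bool)) = true := by
                simp; exact fun h => hd h.symm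
              simp [this, Bool.or_assoc, Bool.and_comm]
        · -- class changes: run resets to 1
          simp only [pvLoopB, if_neg (by simp [hcl] : ¬ (some (pvIsV p) = some (pvIsV c))),
            if_neg (by omega : ¬ (1 = 3)), if_neg hbadpair]
          rw [(ih c (hasV || pvIsV c)).1]
          rw [show pvPairLoopA p (c :: rest) = pvPairLoopA c rest by
            simp [pvPairLoopA, hpair]]
          cases rest with
          | nil => simp [pvTripleLoopA]
          | cons d rest' =>
            rw [triple_head]
            have : ¬ (pvIsV p = pvIsV c ∧ pvIsV c = pvIsV d) := by tauto
            simp [this, Bool.or_assoc, Bool.and_assoc]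
      · -- run = 2
        by_cases hcl : pvIsV p = pvIsV c
        · -- same class: run would become 3 → false; RHS's head-check is false too
          simp only [pvLoopB, if_pos (by simp [hcl] : (some (pvIsV p) = some (pvIsV c)))]
          have : (!(pvIsV c = pvIsV p : Bool)) = false := by simp [hcl.symm]
          simp [this]
        · -- class changes: run resets to 1; head-check true
          simp only [pvLoopB, if_neg (by simp [hcl] : ¬ (some (pvIsV p) = some (pvIsV c))),
            if_neg (by omega : ¬ (1 = 3)), if_neg hbadpair]
          rw [(ih c (hasV || pvIsV c)).1]
          rw [show pvPairLoopA p (c :: rest) = pvPairLoopA c rest by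
            simp [pvPairLoopA, hpair]]
          have hh : (!(pvIsV c = pvIsV p : Bool)) = true := by
            simp; exact fun h => hcl h.symm
          cases rest with
          | nil => simp [pvTripleLoopA, hh]
          | cons d rest' =>
            rw [triple_head]
            have : ¬ (pvIsV p = pvIsV c ∧ pvIsV c = pvIsV d) := by tauto
            simp [this, hh, Bool.or_assoc, Bool.and_assoc]
    · -- pair check fails: both sides return false
      push Not at hpair
      obtain ⟨h1, h2, h3⟩ := hpair
      subst h3
      have he : ¬ (p = 'e' ∨ p = 'o') := by
        rintro (rfl | rfl)
        · exact h1 rfl rfl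
        · exact h2 rfl rfl
      have hfa : pvPairLoopA p (p :: rest) = false := by
        simp only [pvPairLoopA]
        rw [if_neg]; rintro (⟨rfl, h⟩ | ⟨rfl, h⟩ | h) <;> simp_all
      constructor
      · simp [pvLoopB, hfa, he]
      · simp [pvLoopB, hfa]

-- for strings of length < 3, A's triple loop is vacuously true
theorem triple_short (s : List Char) (h : ¬ s.length ≥ 3) : pvTripleLoopA s = true := by
  rcases s with _ | ⟨a, _ | ⟨b, _ | ⟨c, t⟩⟩⟩ <;> simp_all [pvTripleLoopA]

-- ===== VERDICT (by name: the statement is the Claim_ definition above) =====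
theorem check_pw_spec : Claim_equal_check_pw := by
  intro pw _hdom
  unfold Spec_check_pw
  show check_pw pw = check_pw_alt pw
  simp only [check_pw, check_pw_alt]
  rw [vowel_eq]
  cases s : pw.toList with
  | nil => simp [pvLoopB]
  | cons a rest =>
    -- B's first iteration: prev_class = None, so run := 1, no pair match
    have hB : pvLoopB false none none 0 (a :: rest)
        = pvLoopB (pvIsV a) (some a) (some (pvIsV a)) 1 rest := by
      simp [pvLoopB]
    rw [hB, (loopB_spec rest a (pvIsV a)).1]
    cases hv : (a :: rest).any pvIsV
    · simp only [Bool.not_false]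
      simp only [List.any_cons, Bool.or_eq_false_iff] at hv
      simp [hv.1, hv.2]
    · simp only [Bool.not_true, Bool.false_eq_true, if_false]
      cases hp : pvPairLoopA a rest
      · simp
      · simp only [Bool.not_true, Bool.false_eq_true, if_false, Bool.true_and]
        by_cases hl : (a :: rest).length ≥ 3
        · simp only [if_pos hl]
          simp only [List.any_cons] at hv
          simp [hv]
        · simp only [if_neg hl, triple_short _ hl]
          simp only [List.any_cons] at hv
          simp [hv]
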